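-- pv_equiv track=rewrite | github.com/PasamTharun/Indian-Legal-Kag-System | scripts/extract_constitution_pdf.py | determine_part
-- ===== SOURCE A (Python) =====
-- def determine_part(article_num: int) -> str:
--     part_ranges = {
--         "I": (1, 4), "II": (5, 11), "III": (12, 35), "IV": (36, 51),
--         "V": (52, 151), "VI": (152, 237), "VIII": (239, 242),
--         "IX": (243, 243), "XI": (245, 263), "XII": (264, 300),
--         "XV": (324, 329), "XVIII": (352, 360)
--     }
--     for part, (start, end) in part_ranges.items():
--         if start <= article_num <= end:
--             return part
--     return "Other"
-- ===== SOURCE B (Python) =====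
-- _STARTS = [1, 5, 12, 36, 52, 152, 239, 243, 245, 264, 324, 352]
-- _ENDS   = [4, 11, 35, 51, 151, 237, 242, 243, 263, 300, 329, 360]
-- _PARTS  = ["I", "II", "III", "IV", "V", "VI", "VIII", "IX", "XI", "XII", "XV", "XVIII"]
--
--
-- def determine_part(article_num: int) -> str:
--     # binary search (bisect_right) for the last range start <= article_num
--     lo, hi = 0, len(_STARTS)
--     while lo < hi:
--         mid = (lo + hi) // 2
--         if article_num < _STARTS[mid]:
--             hi = mid
--         else:
--             lo = mid + 1
--     i = lo - 1
--     if i >= 0 and article_num <= _ENDS[i]: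
--         return _PARTS[i]
--     return "Other"
-- ===== Notes on version B (the rewrite author's own statement) =====
-- stated objective: alternative
-- what changed: Replaces the linear scan over a dict of (start,end) ranges by a binary search over parallel sorted start/end/part arrays: bisect_right finds the last start <= article_num, then one end-check decides part or "Other".
import Mathlib
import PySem

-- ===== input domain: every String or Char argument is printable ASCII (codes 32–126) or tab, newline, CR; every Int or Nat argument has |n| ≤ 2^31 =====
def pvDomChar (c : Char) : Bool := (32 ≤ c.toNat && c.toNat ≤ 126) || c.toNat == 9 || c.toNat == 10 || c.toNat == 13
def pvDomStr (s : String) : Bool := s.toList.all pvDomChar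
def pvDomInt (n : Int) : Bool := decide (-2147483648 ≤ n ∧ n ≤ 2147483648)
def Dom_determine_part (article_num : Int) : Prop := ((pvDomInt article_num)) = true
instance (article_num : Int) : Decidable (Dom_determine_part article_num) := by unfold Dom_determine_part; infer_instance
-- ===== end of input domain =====

-- B replaces A's linear scan over a dict of ranges by a binary search over sorted parallel start/end/part arrays (alternative structure, O(log k) per query).

-- ===== PORT A =====
-- the 'for part, (start, end) in part_ranges.items()' loop with early return
def pvScanLoop : List (String × (Int × Int)) → Int → String
  | [], _ => "Other"
  | (part, se) :: rest, n => if se.1 ≤ n ∧ n ≤ se.2 then part else pvScanLoop rest n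

def determine_part (article_num : Int) : String :=
  let part_ranges : PySem.Dict String (Int × Int) := PySem.Dict.ofList
    [("I", (1, 4)), ("II", (5, 11)), ("III", (12, 35)), ("IV", (36, 51)),
     ("V", (52, 151)), ("VI", (152, 237)), ("VIII", (239, 242)),
     ("IX", (243, 243)), ("XI", (245, 263)), ("XII", (264, 300)),
     ("XV", (324, 329)), ("XVIII", (352, 360))]
  pvScanLoop part_ranges.items article_num

-- ===== PORT B =====
def pvStarts : List Int := [1, 5, 12, 36, 52, 152, 239, 243, 245, 264, 324, 352]
def pvEnds : List Int := [4, 11, 35, 51, 151, 237, 242, 243, 263, 300, 329, 360]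
def pvParts : List String := ["I", "II", "III", "IV", "V", "VI", "VIII", "IX", "XI", "XII", "XV", "XVIII"]

-- the 'while lo < hi' bisect_right loop of Source B; fuel only makes the loop total
-- (12 iterations more than suffice for a 12-element list); _STARTS[mid] is indexed
-- with pyGet?, and mid is always a valid nonnegative index so the .getD default is dead.
def pvBisect : Nat → Int → Int → Int → Int
  | 0, _, lo, _ => lo
  | fuel + 1, n, lo, hi =>
    if lo < hi then
      let mid := PySem.Int.floordiv (lo + hi) 2
      if n < (PySem.List.pyGet? pvStarts mid).getD 0 then
        pvBisect fuel n lo mid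
      else
        pvBisect fuel n (mid + 1) hi
    else lo

def determine_part_alt (article_num : Int) : String :=
  let lo := pvBisect 12 article_num 0 12
  let i := lo - 1
  -- i is a valid index whenever i >= 0, so the .getD defaults are dead code
  if 0 ≤ i ∧ article_num ≤ (PySem.List.pyGet? pvEnds i).getD 0 then
    (PySem.List.pyGet? pvParts i).getD "Other"
  else "Other"

-- ===== PRECONDITION & SPEC =====
def Spec_determine_part (article_num : Int) (out : String) : Prop := out = determine_part_alt article_num
instance (article_num : Int) (out : String) : Decidable (Spec_determine_part article_num out) := by unfold Spec_determine_part; infer_instance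

-- ===== CLAIM (what is proved, stated in full; the proofs are below) =====
def Claim_equal_determine_part : Prop := ∀ (article_num : Int), Dom_determine_part article_num → Spec_determine_part article_num (determine_part article_num)

-- ===== LEMMAS AND PROOFS =====
set_option maxRecDepth 8000
set_option maxHeartbeats 1000000

-- every start is at least 1 and at most 352
lemma pv_starts_bounds : ∀ m : Int, 0 ≤ m → m < 12 →
    1 ≤ (PySem.List.pyGet? pvStarts m).getD 0 ∧ (PySem.List.pyGet? pvStarts m).getD 0 ≤ 352 := by
  intro m h0 h12
  interval_cases m <;> decide

-- if n is below every start, the bisect loop converges to 0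
lemma pv_bisect_low (n : Int) (hn : n < 1) : ∀ (fuel : Nat) (hi : Int), 0 ≤ hi → hi ≤ 12 →
    pvBisect fuel n 0 hi = 0 := by
  intro fuel
  induction fuel with
  | zero => intro hi _ _; rfl
  | succ f ih =>
    intro hi h0 h12
    rw [pvBisect]
    by_cases hlt : (0 : Int) < hi
    · rw [if_pos hlt]
      have hmid : PySem.Int.floordiv (0 + hi) 2 = (0 + hi) / 2 :=
        PySem.Int.floordiv_eq_ediv_of_pos (by norm_num)
      simp only [hmid]
      have hb := pv_starts_bounds ((0 + hi) / 2) (by omega) (by omega)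
      rw [if_pos (by omega)]
      exact ih ((0 + hi) / 2) (by omega) (by omega)
    · rw [if_neg hlt]

-- if n is above every start, the bisect loop climbs to 12
lemma pv_bisect_high (n : Int) (hn : 360 < n) : ∀ (fuel : Nat) (lo : Int), 0 ≤ lo → lo ≤ 12 →
    12 - lo ≤ (fuel : Int) → pvBisect fuel n lo 12 = 12 := by
  intro fuel
  induction fuel with
  | zero => intro lo _ h12 hf; show lo = 12; omega
  | succ f ih =>
    intro lo h0 h12 hf
    rw [pvBisect]
    by_cases hlt : lo < (12 : Int)
    · rw [if_pos hlt]
      have hmid : PySem.Int.floordiv (lo + 12) 2 = (lo + 12) / 2 :=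
        PySem.Int.floordiv_eq_ediv_of_pos (by norm_num)
      simp only [hmid]
      have hb := pv_starts_bounds ((lo + 12) / 2) (by omega) (by omega)
      rw [if_neg (by omega)]
      exact ih ((lo + 12) / 2 + 1) (by omega) (by omega) (by push_cast at hf ⊢; omega)
    · rw [if_neg hlt]; omega

-- agreement on every in-range article number, by evaluation
lemma pv_inrange : ∀ n ∈ PySem.List.pyRange 1 361 1,
    determine_part n = determine_part_alt n := by decide

-- determine_part_alt with the let-bindings beta-reduced
lemma pv_alt_eq (n : Int) : determine_part_alt n =
    (if 0 ≤ pvBisect 12 n 0 12 - 1 ∧ n ≤ (PySem.List.pyGet? pvEnds (pvBisect 12 n 0 12 - 1)).getD 0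
     then (PySem.List.pyGet? pvParts (pvBisect 12 n 0 12 - 1)).getD "Other" else "Other") := rfl

-- A returns "Other" outside all ranges
lemma pv_A_other (n : Int) (h : n < 1 ∨ 360 < n) : determine_part n = "Other" := by
  unfold determine_part
  have hitems : (PySem.Dict.ofList
      [("I", ((1 : Int), (4 : Int))), ("II", (5, 11)), ("III", (12, 35)), ("IV", (36, 51)),
       ("V", (52, 151)), ("VI", (152, 237)), ("VIII", (239, 242)),
       ("IX", (243, 243)), ("XI", (245, 263)), ("XII", (264, 300)),
       ("XV", (324, 329)), ("XVIII", (352, 360))]).items =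
      [("I", (1, 4)), ("II", (5, 11)), ("III", (12, 35)), ("IV", (36, 51)),
       ("V", (52, 151)), ("VI", (152, 237)), ("VIII", (239, 242)),
       ("IX", (243, 243)), ("XI", (245, 263)), ("XII", (264, 300)),
       ("XV", (324, 329)), ("XVIII", (352, 360))] := by decide
  show pvScanLoop (PySem.Dict.ofList
      [("I", ((1 : Int), (4 : Int))), ("II", (5, 11)), ("III", (12, 35)), ("IV", (36, 51)),
       ("V", (52, 151)), ("VI", (152, 237)), ("VIII", (239, 242)),
       ("IX", (243, 243)), ("XI", (245, 263)), ("XII", (264, 300)),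
       ("XV", (324, 329)), ("XVIII", (352, 360))]).items n = "Other"
  rw [hitems]
  simp only [pvScanLoop]
  split_ifs <;> first | rfl | (exfalso; omega)

-- ===== VERDICT (by name: the statement is the Claim_ definition above) =====
theorem determine_part_spec : Claim_equal_determine_part := by
  intro n _
  unfold Spec_determine_part
  by_cases hin : 1 ≤ n ∧ n ≤ 360
  · exact pv_inrange n (by rw [PySem.List.mem_pyRange_one]; omega)
  · rw [pv_A_other n (by omega)]
    rw [pv_alt_eq]
    by_cases hlow : n < 1
    · rw [pv_bisect_low n hlow 12 12 (by omega) (by omega)]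
      rw [if_neg (by omega)]
    · have hhigh : 360 < n := by omega
      rw [pv_bisect_high n hhigh 12 0 (by omega) (by omega) (by omega)]
      have h11 : ((12 : Int) - 1) = 11 := by omega
      rw [h11]
      have hend : (PySem.List.pyGet? pvEnds 11).getD 0 = 360 := by decide
      rw [hend, if_neg (by omega)]
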